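-- pv_equiv track=rewrite | github.com/Aivydb21/Uncle_mays | investor-outreach/scripts/prioritize-contacts.py | is_in_target_metro
-- ===== SOURCE A (Python) =====
-- TARGET_METRO_CITIES = {
--     "SF/Bay Area": [
--         "san francisco", "palo alto", "menlo park", "san jose", "oakland",
--         "mountain view", "redwood city", "sunnyvale", "berkeley", "mill valley",
--         "sausalito", "san mateo", "burlingame", "foster city", "woodside",
--         "atherton", "los altos", "cupertino", "walnut creek", "tiburon",
--     ],
--     "Los Angeles": [
--         "los angeles", "santa monica", "beverly hills", "west hollywood",
--         "pasadena", "manhattan beach", "el segundo", "venice", "culver city",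
--         "brentwood", "playa vista",
--     ],
--     "New York": [
--         "new york", "brooklyn", "manhattan", "greenwich", "stamford",
--         "jersey city", "hoboken", "westport", "old westbury", "garden city",
--     ],
--     "DC/DMV": [
--         "washington", "arlington", "bethesda", "mclean", "alexandria",
--         "chevy chase", "reston", "tysons", "rockville", "silver spring",
--     ],
--     "Chicago": [
--         "chicago", "evanston", "oak brook", "winnetka", "lake forest",
--         "northbrook", "naperville", "deerfield", "highland park", "wilmette",
--     ],
-- }
--
-- def is_in_target_metro(contact):
--     """Check if a contact is in one of the 5 target metros."""
--     city = (contact.get("city") or "").lower().strip()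
--     if not city:
--         return False, "Unknown"
--     for metro, cities in TARGET_METRO_CITIES.items():
--         if city in cities:
--             return True, metro
--     return False, "Other"
-- ===== SOURCE B (Python) =====
-- TARGET_METRO_CITIES = {
--     "SF/Bay Area": [
--         "san francisco", "palo alto", "menlo park", "san jose", "oakland",
--         "mountain view", "redwood city", "sunnyvale", "berkeley", "mill valley",
--         "sausalito", "san mateo", "burlingame", "foster city", "woodside",
--         "atherton", "los altos", "cupertino", "walnut creek", "tiburon",
--     ],
--     "Los Angeles": [
--         "los angeles", "santa monica", "beverly hills", "west hollywood",
--         "pasadena", "manhattan beach", "el segundo", "venice", "culver city",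
--         "brentwood", "playa vista",
--     ],
--     "New York": [
--         "new york", "brooklyn", "manhattan", "greenwich", "stamford",
--         "jersey city", "hoboken", "westport", "old westbury", "garden city",
--     ],
--     "DC/DMV": [
--         "washington", "arlington", "bethesda", "mclean", "alexandria",
--         "chevy chase", "reston", "tysons", "rockville", "silver spring",
--     ],
--     "Chicago": [
--         "chicago", "evanston", "oak brook", "winnetka", "lake forest",
--         "northbrook", "naperville", "deerfield", "highland park", "wilmette",
--     ],
-- }
--
-- # Inverted index: city -> metro, built once at module load (no city occurs in two metros).
-- CITY_TO_METRO = {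
--     city: metro
--     for metro, cities in TARGET_METRO_CITIES.items()
--     for city in cities
-- }
--
-- def is_in_target_metro(contact):
--     """Check if a contact is in one of the 5 target metros."""
--     city = (contact.get("city") or "").lower().strip()
--     if not city:
--         return False, "Unknown"
--     metro = CITY_TO_METRO.get(city)
--     return (True, metro) if metro is not None else (False, "Other")
-- ===== Notes on version B (the rewrite author's own statement) =====
-- stated objective: idiomatic
-- what changed: B builds a flat city-to-metro inverted index once at module load and replaces A's per-call loop over the five metro city lists with a single dict lookup.
import Mathlib
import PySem

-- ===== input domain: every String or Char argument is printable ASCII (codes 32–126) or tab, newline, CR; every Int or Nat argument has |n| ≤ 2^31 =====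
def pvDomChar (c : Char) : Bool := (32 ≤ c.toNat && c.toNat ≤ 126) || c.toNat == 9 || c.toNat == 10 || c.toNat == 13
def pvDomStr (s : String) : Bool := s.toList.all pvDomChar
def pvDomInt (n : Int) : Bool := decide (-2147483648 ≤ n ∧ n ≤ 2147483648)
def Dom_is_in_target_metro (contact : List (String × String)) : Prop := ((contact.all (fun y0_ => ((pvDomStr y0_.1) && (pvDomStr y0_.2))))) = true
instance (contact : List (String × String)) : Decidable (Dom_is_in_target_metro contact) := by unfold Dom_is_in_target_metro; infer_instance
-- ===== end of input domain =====

-- B replaces A's per-call scan over the five metro city lists with a flat city→metro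
-- inverted index built once at module load (objective: idiomatic; no speed claim proved).

-- ===== PORT A =====
def TARGET_METRO_CITIES : List (String × List String) := [
  ("SF/Bay Area", [
    "san francisco", "palo alto", "menlo park", "san jose", "oakland",
    "mountain view", "redwood city", "sunnyvale", "berkeley", "mill valley",
    "sausalito", "san mateo", "burlingame", "foster city", "woodside",
    "atherton", "los altos", "cupertino", "walnut creek", "tiburon"]),
  ("Los Angeles", [
    "los angeles", "santa monica", "beverly hills", "west hollywood",
    "pasadena", "manhattan beach", "el segundo", "venice", "culver city",
    "brentwood", "playa vista"]),
  ("New York", [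
    "new york", "brooklyn", "manhattan", "greenwich", "stamford",
    "jersey city", "hoboken", "westport", "old westbury", "garden city"]),
  ("DC/DMV", [
    "washington", "arlington", "bethesda", "mclean", "alexandria",
    "chevy chase", "reston", "tysons", "rockville", "silver spring"]),
  ("Chicago", [
    "chicago", "evanston", "oak brook", "winnetka", "lake forest",
    "northbrook", "naperville", "deerfield", "highland park", "wilmette"])]

-- the 'for metro, cities in TARGET_METRO_CITIES.items(): if city in cities: return ...' loop
def scanMetros (city : String) : List (String × List String) → Bool × String
  | [] => (false, "Other")
  | (metro, cities) :: rest =>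
      if city ∈ cities then (true, metro) else scanMetros city rest

def is_in_target_metro (contact : List (String × String)) : Bool × String :=
  -- (contact.get("city") or "").lower().strip(); 'or ""' maps both None and "" to ""
  let city := PySem.Str.strip (PySem.Str.lower ((List.lookup "city" contact).getD ""))
  if city = "" then (false, "Unknown")
  else scanMetros city TARGET_METRO_CITIES

-- ===== PORT B =====
-- CITY_TO_METRO = {city: metro for metro, cities in TARGET_METRO_CITIES.items() for city in cities}
def CITY_TO_METRO : PySem.Dict String String :=
  PySem.Dict.ofList
    (TARGET_METRO_CITIES.flatMap (fun p => p.2.map (fun city => (city, p.1))))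

def is_in_target_metro_alt (contact : List (String × String)) : Bool × String :=
  let city := PySem.Str.strip (PySem.Str.lower ((List.lookup "city" contact).getD ""))
  if city = "" then (false, "Unknown")
  else
    match CITY_TO_METRO.get? city with
    | some metro => (true, metro)
    | none => (false, "Other")

-- ===== PRECONDITION & SPEC =====
def Spec_is_in_target_metro (contact : List (String × String)) (out : Bool × String) : Prop := out = is_in_target_metro_alt contact
instance (contact : List (String × String)) (out : Bool × String) : Decidable (Spec_is_in_target_metro contact out) := by unfold Spec_is_in_target_metro; infer_instance

-- ===== CLAIM (what is proved, stated in full; the proofs are below) =====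
def Claim_equal_is_in_target_metro : Prop := ∀ (contact : List (String × String)), Dom_is_in_target_metro contact → Spec_is_in_target_metro contact (is_in_target_metro contact)

-- ===== LEMMAS AND PROOFS =====

-- looking a city up in one metro's block of the flat index
lemma get?_mk_map_append (c m : String) (cs : List String) (rest : List (String × String)) :
    (PySem.Dict.mk (cs.map (fun x => (x, m)) ++ rest)).get? c
      = if c ∈ cs then some m else (PySem.Dict.mk rest).get? c := by
  induction cs with
  | nil => simp
  | cons x xs ih =>
      rw [List.map_cons, List.cons_append, PySem.Dict.get?_mk_cons]
      by_cases hx : x = c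
      · subst hx; simp
      · rw [if_neg (by simpa using hx), ih]
        simp [List.mem_cons, show ¬ c = x from fun h => hx h.symm]

-- the folded-insert index equals the flat literal list (keys are distinct)
set_option maxRecDepth 40000 in
lemma city_to_metro_items :
    CITY_TO_METRO
      = PySem.Dict.mk
          (TARGET_METRO_CITIES.flatMap (fun p => p.2.map (fun city => (city, p.1)))) := by
  decide

lemma index_eq_scan (city : String) :
    scanMetros city TARGET_METRO_CITIES
      = ((CITY_TO_METRO.get? city).isSome, (CITY_TO_METRO.get? city).getD "Other") := by
  rw [city_to_metro_items]
  simp only [TARGET_METRO_CITIES, List.flatMap_cons, List.flatMap_nil]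
  simp only [get?_mk_map_append, scanMetros]
  simp only [PySem.Dict.get?, List.find?_nil, Option.map_none]
  split_ifs <;> rfl

-- ===== VERDICT (by name: the statement is the Claim_ definition above) =====
set_option maxRecDepth 40000 in
set_option maxHeartbeats 2000000 in
theorem is_in_target_metro_spec : Claim_equal_is_in_target_metro := by
  intro contact _
  unfold Spec_is_in_target_metro is_in_target_metro is_in_target_metro_alt
  by_cases hc :
      PySem.Str.strip (PySem.Str.lower ((List.lookup "city" contact).getD "")) = ""
  · simp only [if_pos hc]
  · simp only [if_neg hc]
    rw [index_eq_scan]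
    generalize CITY_TO_METRO.get?
      (PySem.Str.strip (PySem.Str.lower ((List.lookup "city" contact).getD ""))) = o
    cases o <;> rfl
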